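-- pv_equiv track=rewrite | github.com/spenpal/advent-of-code | src/2021/d22.py | part2
-- ===== SOURCE A (Python) =====
-- import math
--
-- def oppState(state):
--     return "off" if state == "on" else "on"
--
-- def intersection(c1, c2):
--     def plane_intersection(r1, r2):
--         i = (max(r1[0], r2[0]), min(r1[-1], r2[-1]))
--         return i if i[0] <= i[1] else ()
--
--     inter = tuple(plane_intersection(r1, r2) for r1, r2 in zip(c1, c2, strict=False))
--     return inter if all(r for r in inter) else None
--
-- def total_cubes(core):
--     return math.prod(r[1] - r[0] + 1 for r in core)
--
-- def part2(steps):
--     """Read Reddit solution on Set Theory to do this one"""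
--     reactor = []
--
--     for cuboid_state, cuboid in steps:
--         new_cores = [(cuboid_state, cuboid)] if cuboid_state == "on" else []
--
--         for core_state, core in reactor:
--             if inter := intersection(cuboid, core):
--                 new_cores.append((oppState(core_state), inter))
--
--         reactor.extend(new_cores)
--
--     return sum((1 if state == "on" else -1) * total_cubes(core) for state, core in reactor)
-- ===== SOURCE B (Python) =====
-- def part2(steps):
--     """Recursive inclusion-exclusion over chains of later overlapping cuboids,
--     instead of accumulating a signed reactor list."""
--
--     def clip(core, cub):
--         out = []
--         for (a1, b1), (a2, b2) in zip(core, cub):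
--             lo, hi = max(a1, a2), min(b1, b2)
--             if lo > hi:
--                 return None
--             out.append((lo, hi))
--         return out or None
--
--     def vol(core):
--         v = 1
--         for a, b in core:
--             v *= b - a + 1
--         return v
--
--     def covered(core, rest):
--         # signed (inclusion-exclusion) count of cells of `core` also hit by later cuboids
--         total = 0
--         for j, (_, cub) in enumerate(rest):
--             c = clip(core, cub)
--             if c is not None:
--                 total += vol(c) - covered(c, rest[j + 1:])
--         return total
--
--     total = 0
--     for i, (state, cub) in enumerate(steps):
--         if state == "on":
--             total += vol(cub) - covered(cub, steps[i + 1:])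
--     return total
-- ===== Notes on version B (the rewrite author's own statement) =====
-- stated objective: alternative
-- what changed: Replaces A's incrementally grown signed 'reactor' list of inclusion-exclusion correction cores with a direct recursion: for each 'on' step, its contribution is its volume minus a recursively computed signed overlap over chains of later intersecting cuboids; no reactor list is ever materialised.
import Mathlib
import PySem

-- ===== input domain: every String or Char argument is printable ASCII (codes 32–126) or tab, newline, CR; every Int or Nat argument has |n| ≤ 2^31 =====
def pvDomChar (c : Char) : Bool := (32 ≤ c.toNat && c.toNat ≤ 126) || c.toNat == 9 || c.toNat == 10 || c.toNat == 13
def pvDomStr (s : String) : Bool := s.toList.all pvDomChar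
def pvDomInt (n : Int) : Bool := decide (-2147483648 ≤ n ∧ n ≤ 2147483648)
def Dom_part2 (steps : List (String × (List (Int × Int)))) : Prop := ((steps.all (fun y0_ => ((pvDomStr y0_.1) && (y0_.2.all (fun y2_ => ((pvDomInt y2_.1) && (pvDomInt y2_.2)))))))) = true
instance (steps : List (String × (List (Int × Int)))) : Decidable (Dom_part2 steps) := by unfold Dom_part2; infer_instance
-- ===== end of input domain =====

-- B replaces A's growing signed "reactor" list with a direct recursive
-- inclusion-exclusion over chains of later overlapping cuboids (alternative
-- decomposition; same exponential worst-case cost).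

-- ===== PORT A =====
def oppState (s : String) : String := if s == "on" then "off" else "on"

-- intersection(c1, c2): each plane result is () (none) or a pair (some);
-- Python returns None unless every plane is truthy, the walrus test is also
-- false when the resulting tuple is empty (handled at the use site).
def interA (c1 c2 : List (Int × Int)) : Option (List (Int × Int)) :=
  let inter := List.zipWith
    (fun r1 r2 : Int × Int =>
      let i : Int × Int := (max r1.1 r2.1, min r1.2 r2.2)
      if i.1 ≤ i.2 then some i else none) c1 c2
  if inter.all Option.isSome then some (inter.filterMap id) else none

def totalCubes (core : List (Int × Int)) : Int :=
  core.foldl (fun acc r => acc * (r.2 - r.1 + 1)) 1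

def part2 (steps : List (String × (List (Int × Int)))) : Int :=
  let reactor := steps.foldl
    (fun reactor step =>
      let new_cores := if step.1 == "on" then [(step.1, step.2)] else []
      let new_cores := reactor.foldl
        (fun nc e =>
          match interA step.2 e.2 with
          | some l => if l.isEmpty then nc else nc ++ [(oppState e.1, l)]
          | none => nc) new_cores
      reactor ++ new_cores) []
  reactor.foldl (fun s e => s + (if e.1 == "on" then 1 else -1) * totalCubes e.2) 0

-- ===== PORT B =====
-- clip's loop: early `return None` on an empty plane, `out or None` at the end
def clipGo : List (Int × Int) → List (Int × Int) → Option (List (Int × Int))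
  | (a1, b1) :: cs, (a2, b2) :: ds =>
      let lo := max a1 a2
      let hi := min b1 b2
      if lo > hi then none else (clipGo cs ds).map (fun t => (lo, hi) :: t)
  | _, _ => some []

def clip (core cub : List (Int × Int)) : Option (List (Int × Int)) :=
  match clipGo core cub with
  | some [] => none
  | r => r

def volB (core : List (Int × Int)) : Int :=
  core.foldl (fun v r => v * (r.2 - r.1 + 1)) 1

def coveredB : List (Int × Int) → List (String × (List (Int × Int))) → Int
  | _, [] => 0
  | core, (_, cub) :: rest =>
      (match clip core cub with
       | some c => volB c - coveredB c rest
       | none => 0) + coveredB core rest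

def altGo : List (String × (List (Int × Int))) → Int
  | [] => 0
  | (st, cub) :: rest =>
      (if st == "on" then volB cub - coveredB cub rest else 0) + altGo rest

def part2_alt (steps : List (String × (List (Int × Int)))) : Int :=
  altGo steps

-- ===== PRECONDITION & SPEC =====
def Spec_part2 (steps : List (String × (List (Int × Int)))) (out : Int) : Prop := out = part2_alt steps
instance (steps : List (String × (List (Int × Int)))) (out : Int) : Decidable (Spec_part2 steps out) := by unfold Spec_part2; infer_instance

-- ===== CLAIM (what is proved, stated in full; the proofs are below) =====
def Claim_equal_part2 : Prop := ∀ (steps : List (String × (List (Int × Int)))), Dom_part2 steps → Spec_part2 steps (part2 steps)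

-- ===== LEMMAS AND PROOFS =====

def plane (r1 r2 : Int × Int) : Option (Int × Int) :=
  let i : Int × Int := (max r1.1 r2.1, min r1.2 r2.2)
  if i.1 ≤ i.2 then some i else none

theorem interA_eq (c1 c2 : List (Int × Int)) :
    interA c1 c2 =
      (if (List.zipWith plane c1 c2).all Option.isSome
       then some ((List.zipWith plane c1 c2).filterMap id) else none) := rfl

theorem zipWith_plane_comm : ∀ (a b : List (Int × Int)),
    List.zipWith plane a b = List.zipWith plane b a := by
  intro a
  induction a with
  | nil => intro b; cases b <;> rfl
  | cons x xs ih =>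
      intro b
      cases b with
      | nil => rfl
      | cons y ys =>
          simp only [List.zipWith, ih ys]
          congr 1
          simp [plane, max_comm, min_comm]

theorem clipGo_eq : ∀ (a b : List (Int × Int)),
    clipGo a b =
      (if (List.zipWith plane a b).all Option.isSome
       then some ((List.zipWith plane a b).filterMap id) else none) := by
  intro a
  induction a with
  | nil => intro b; cases b <;> rfl
  | cons x xs ih =>
      intro b
      cases b with
      | nil => rfl
      | cons y ys =>
          obtain ⟨a1, b1⟩ := x
          obtain ⟨a2, b2⟩ := y
          show (if max a1 a2 > min b1 b2 then none
                else (clipGo xs ys).map (fun t => (max a1 a2, min b1 b2) :: t)) = _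
          rw [ih ys]
          by_cases h : max a1 a2 ≤ min b1 b2
          · rw [if_neg (by omega)]
            by_cases hall : (List.zipWith plane xs ys).all Option.isSome
            · rw [if_pos hall]
              have : List.zipWith plane ((a1, b1) :: xs) ((a2, b2) :: ys)
                  = some (max a1 a2, min b1 b2) :: List.zipWith plane xs ys := by
                simp [List.zipWith, plane, h]
              rw [this]
              simp [hall]
            · rw [if_neg hall]
              have : List.zipWith plane ((a1, b1) :: xs) ((a2, b2) :: ys)
                  = some (max a1 a2, min b1 b2) :: List.zipWith plane xs ys := by
                simp [List.zipWith, plane, h]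
              rw [this]
              simp [hall]
          · rw [if_pos (by omega)]
            have : List.zipWith plane ((a1, b1) :: xs) ((a2, b2) :: ys)
                = none :: List.zipWith plane xs ys := by
              simp [List.zipWith, plane, h]
            rw [this]
            simp

theorem clip_eq (a b : List (Int × Int)) :
    clip a b =
      (match interA b a with
       | some l => if l.isEmpty then none else some l
       | none => none) := by
  unfold clip
  rw [clipGo_eq, zipWith_plane_comm, interA_eq]
  by_cases hall : (List.zipWith plane b a).all Option.isSome
  · rw [if_pos hall]
    cases h : (List.zipWith plane b a).filterMap id <;> simp
  · rw [if_neg hall]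

def sign (t : String) : Int := if t == "on" then 1 else -1

theorem sign_opp (t : String) : sign (oppState t) = - sign t := by
  unfold sign oppState
  by_cases h : t == "on" <;> simp [h]

def uVal (core : List (Int × Int)) (L : List (String × (List (Int × Int)))) : Int :=
  volB core - coveredB core L

def sigU (R : List (String × (List (Int × Int)))) (L : List (String × (List (Int × Int)))) : Int :=
  (R.map (fun e => sign e.1 * uVal e.2 L)).sum

def childOf (cub : List (Int × Int)) (e : String × (List (Int × Int))) :
    Option (String × (List (Int × Int))) :=
  (clip e.2 cub).map (fun l => (oppState e.1, l))

-- A's loop body and final sum, named for the proof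
def AStep (reactor : List (String × (List (Int × Int)))) (step : String × (List (Int × Int))) :
    List (String × (List (Int × Int))) :=
  let new_cores := if step.1 == "on" then [(step.1, step.2)] else []
  let new_cores := reactor.foldl
    (fun nc e =>
      match interA step.2 e.2 with
      | some l => if l.isEmpty then nc else nc ++ [(oppState e.1, l)]
      | none => nc) new_cores
  reactor ++ new_cores

def Asum (R : List (String × (List (Int × Int)))) : Int :=
  R.foldl (fun s e => s + (if e.1 == "on" then 1 else -1) * totalCubes e.2) 0

theorem part2_eq_Asum (steps : List (String × (List (Int × Int)))) :
    part2 steps = Asum (steps.foldl AStep []) := rfl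

theorem inner_fold (cub : List (Int × Int)) :
    ∀ (R acc : List (String × (List (Int × Int)))),
      R.foldl (fun nc e =>
          match interA cub e.2 with
          | some l => if l.isEmpty then nc else nc ++ [(oppState e.1, l)]
          | none => nc) acc
        = acc ++ R.filterMap (childOf cub) := by
  intro R
  induction R with
  | nil => intro acc; simp
  | cons e R ih =>
      intro acc
      rw [List.foldl_cons, List.filterMap_cons]
      have hc := clip_eq e.2 cub
      cases h : interA cub e.2 with
      | none =>
          rw [h] at hc
          have hcn : clip e.2 cub = none := hc
          rw [ih]
          simp [childOf, hcn]
      | some l =>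
          rw [h] at hc
          cases l with
          | nil =>
              have hcn : clip e.2 cub = none := by simpa using hc
              simp only [List.isEmpty_nil, if_true]
              rw [ih]
              simp [childOf, hcn]
          | cons z zs =>
              have hcs : clip e.2 cub = some (z :: zs) := by simpa using hc
              simp only [List.isEmpty_cons]
              rw [ih]
              simp [childOf, hcs]

theorem AStep_eq (R : List (String × (List (Int × Int)))) (step : String × (List (Int × Int))) :
    AStep R step =
      R ++ ((if step.1 == "on" then [(step.1, step.2)] else []) ++ R.filterMap (childOf step.2)) := by
  unfold AStep
  show R ++ (R.foldl _ (if (step.1 == "on") = true then [(step.1, step.2)] else [])) = _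
  rw [inner_fold]

theorem foldl_add_int {α : Type} (g : α → Int) :
    ∀ (l : List α) (a : Int), l.foldl (fun s e => s + g e) a = a + (l.map g).sum := by
  intro l
  induction l with
  | nil => intro a; simp
  | cons x xs ih => intro a; simp [ih]; ring

theorem Asum_eq (R : List (String × (List (Int × Int)))) :
    Asum R = (R.map (fun e => sign e.1 * totalCubes e.2)).sum := by
  unfold Asum sign
  rw [foldl_add_int (fun e : String × (List (Int × Int)) => (if e.1 == "on" then 1 else -1) * totalCubes e.2)]
  simp

theorem sigU_append (R1 R2 L) : sigU (R1 ++ R2) L = sigU R1 L + sigU R2 L := by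
  unfold sigU; simp

theorem sigU_nil (L) : sigU [] L = 0 := rfl

theorem uVal_step_none {core cub : List (Int × Int)} (s : String) (L : List (String × (List (Int × Int))))
    (h : clip core cub = none) :
    uVal core ((s, cub) :: L) = uVal core L := by
  unfold uVal
  simp [coveredB, h]

theorem uVal_step_some {core cub c : List (Int × Int)} (s : String) (L : List (String × (List (Int × Int))))
    (h : clip core cub = some c) :
    uVal core ((s, cub) :: L) = uVal core L - uVal c L := by
  unfold uVal
  simp [coveredB, h]
  ring

theorem sigU_cons (x : String × (List (Int × Int))) (Rs L) :
    sigU (x :: Rs) L = sign x.1 * uVal x.2 L + sigU Rs L := by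
  simp [sigU]

theorem sigU_step (s : String) (cub : List (Int × Int)) (L : List (String × (List (Int × Int)))) :
    ∀ R, sigU R ((s, cub) :: L) = sigU R L + sigU (R.filterMap (childOf cub)) L := by
  intro R
  induction R with
  | nil => simp [sigU]
  | cons e R ih =>
      obtain ⟨t, core⟩ := e
      rw [List.filterMap_cons]
      cases hc : clip core cub with
      | none =>
          have h : childOf cub (t, core) = none := by simp [childOf, hc]
          rw [h, sigU_cons, sigU_cons, uVal_step_none s L hc, ih]
          ring
      | some c =>
          have h : childOf cub (t, core) = some (oppState t, c) := by simp [childOf, hc]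
          rw [h, sigU_cons, sigU_cons, sigU_cons, uVal_step_some s L hc, ih, sign_opp]
          ring

theorem main_lemma : ∀ (L R : List (String × (List (Int × Int)))),
    Asum (L.foldl AStep R) = sigU R L + altGo L := by
  intro L
  induction L with
  | nil =>
      intro R
      show Asum R = sigU R [] + altGo []
      rw [Asum_eq]
      have hf : (fun e : String × (List (Int × Int)) => sign e.1 * uVal e.2 [])
          = (fun e => sign e.1 * totalCubes e.2) := by
        funext e
        simp [uVal, coveredB, totalCubes, volB]
      unfold sigU altGo
      rw [hf]
      ring
  | cons step L ih =>
      intro R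
      obtain ⟨s, cub⟩ := step
      rw [List.foldl_cons, ih, AStep_eq, sigU_append, sigU_append]
      dsimp only
      rw [sigU_step]
      have ha : altGo ((s, cub) :: L)
          = (if s == "on" then volB cub - coveredB cub L else 0) + altGo L := rfl
      rw [ha]
      have hb : sigU (if s == "on" then [(s, cub)] else []) L
          = (if s == "on" then volB cub - coveredB cub L else 0) := by
        by_cases hs : s == "on"
        · rw [if_pos hs, if_pos hs]
          have hs' : s = "on" := by simpa using hs
          simp [sigU, sign, hs', uVal]
        · rw [if_neg hs, if_neg hs]
          rfl
      rw [hb]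
      ring

-- ===== VERDICT (by name: the statement is the Claim_ definition above) =====
theorem part2_spec : Claim_equal_part2 := by
  intro steps _
  unfold Spec_part2 part2_alt
  rw [part2_eq_Asum, main_lemma, sigU_nil]
  ring
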